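-- pv_equiv track=rewrite | github.com/jrcasso/readme-generator | generate.py | format_devcontainer_extensions
-- ===== SOURCE A (Python) =====
-- from typing import List, Dict, Set, Optional, Any, Tuple, Iterator
--
-- def generate_html_table(headers: List[str], rows: List[List[str]]) -> str:
--     if not rows:
--         return ""
--     num_cols = len(headers)
--     non_empty_cols = []
--     for col_index in range(num_cols):
--         if any(row[col_index].strip() for row in rows):
--             non_empty_cols.append(col_index)
--     new_headers = [headers[i] for i in non_empty_cols]
--     new_rows = [[row[i] for i in non_empty_cols] for row in rows]
--     table = "<table style='border-collapse: collapse;'>"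
--     table += "<tr>" + \
--         "".join(
--             f"<th style='border: 1px solid #ddd; padding:4px;'>{h}</th>" for h in new_headers) + "</tr>"
--     for row in new_rows:
--         table += "<tr>" + \
--             "".join(
--                 f"<td style='border: 1px solid #ddd; padding:4px;'>{cell}</td>" for cell in row) + "</tr>"
--     table += "</table>"
--     return table
--
-- def format_devcontainer_extensions(extensions_list: Optional[List[str]]) -> str:
--     if not extensions_list:
--         return ""
--     rows = []
--     for ext in extensions_list:
--         ext = ext.strip()
--         if ext:
--             link = f'<a href="https://marketplace.visualstudio.com/items?itemName={ext}" target="_blank">{ext}</a>'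
--             rows.append([ext, link])
--     return generate_html_table(["Name", "Store Link"], rows)
-- ===== SOURCE B (Python) =====
-- def format_devcontainer_extensions(extensions_list):
--     if not extensions_list:
--         return ""
--     names = [e.strip() for e in extensions_list]
--     names = [e for e in names if e]
--     if not names:
--         return ""
--     td = "<td style='border: 1px solid #ddd; padding:4px;'>"
--     parts = ["<table style='border-collapse: collapse;'>",
--              "<tr><th style='border: 1px solid #ddd; padding:4px;'>Name</th>"
--              "<th style='border: 1px solid #ddd; padding:4px;'>Store Link</th></tr>"]
--     for ext in names:
--         parts.append(
--             f'<tr>{td}{ext}</td>{td}<a href="https://marketplace.visualstudio.com/items?itemName={ext}" target="_blank">{ext}</a></td></tr>')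
--     parts.append("</table>")
--     return "".join(parts)
-- ===== Notes on version B (the rewrite author's own statement) =====
-- stated objective: simpler
-- what changed: B drops the generic table helper with its non-empty-column scan and rows/new_rows restructuring (provably a no-op here) and builds the HTML in one pass: a fixed literal header row plus one literal row string per non-blank extension, joined at the end.
import Mathlib
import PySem

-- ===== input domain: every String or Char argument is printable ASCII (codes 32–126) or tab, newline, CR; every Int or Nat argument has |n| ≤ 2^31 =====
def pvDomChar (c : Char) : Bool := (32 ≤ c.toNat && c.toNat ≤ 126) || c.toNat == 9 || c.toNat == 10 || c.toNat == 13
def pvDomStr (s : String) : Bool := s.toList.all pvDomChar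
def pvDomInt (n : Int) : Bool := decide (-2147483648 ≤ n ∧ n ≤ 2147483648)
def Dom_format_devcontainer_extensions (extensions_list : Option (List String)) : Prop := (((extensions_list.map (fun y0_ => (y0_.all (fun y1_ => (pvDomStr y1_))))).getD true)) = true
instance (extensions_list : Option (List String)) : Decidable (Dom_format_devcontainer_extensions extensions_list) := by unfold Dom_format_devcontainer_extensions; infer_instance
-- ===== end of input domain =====

-- B builds the table in one pass (fixed header literal + one row string per extension, joined),
-- dropping A's generic helper with its non-empty-column scan and row restructuring; objective: simpler.

-- ===== PORT A =====
-- A-side helper generate_html_table; `row[col_index]` is ported as pyGetD … "" — in A every row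
-- has exactly num_cols entries, so the default is never reached.
def generate_html_table (headers : List String) (rows : List (List String)) : String :=
  if rows = [] then ""
  else
    let num_cols : Int := headers.length
    let non_empty_cols : List Int :=
      (PySem.List.pyRange 0 num_cols 1).foldl
        (fun acc col_index =>
          if rows.any (fun row => PySem.Str.strip (PySem.List.pyGetD row col_index "") != "") then
            acc ++ [col_index]
          else acc) []
    let new_headers : List String := non_empty_cols.map (fun i => PySem.List.pyGetD headers i "")
    let new_rows : List (List String) :=
      rows.map (fun row => non_empty_cols.map (fun i => PySem.List.pyGetD row i ""))
    let table := "<table style='border-collapse: collapse;'>"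
    let table := table ++ "<tr>" ++
      PySem.Str.join ""
        (new_headers.map (fun h => "<th style='border: 1px solid #ddd; padding:4px;'>" ++ h ++ "</th>")) ++ "</tr>"
    let table := new_rows.foldl
      (fun t row => t ++ ("<tr>" ++
        PySem.Str.join ""
          (row.map (fun cell => "<td style='border: 1px solid #ddd; padding:4px;'>" ++ cell ++ "</td>")) ++ "</tr>")) table
    table ++ "</table>"

def format_devcontainer_extensions (extensions_list : Option (List String)) : String :=
  match extensions_list with
  | none => ""
  | some exts =>
    if exts = [] then ""
    else
      let rows : List (List String) :=
        exts.foldl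
          (fun rows ext =>
            let ext := PySem.Str.strip ext
            if ext != "" then
              rows ++ [[ext, "<a href=\"https://marketplace.visualstudio.com/items?itemName=" ++ ext ++ "\" target=\"_blank\">" ++ ext ++ "</a>"]]
            else rows) []
      generate_html_table ["Name", "Store Link"] rows

-- ===== PORT B =====
def format_devcontainer_extensions_alt (extensions_list : Option (List String)) : String :=
  match extensions_list with
  | none => ""
  | some exts =>
    if exts = [] then ""
    else
      let names := (exts.map (fun e => PySem.Str.strip e)).filter (fun e => e != "")
      if names = [] then ""
      else
        let td := "<td style='border: 1px solid #ddd; padding:4px;'>"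
        let parts : List String :=
          ["<table style='border-collapse: collapse;'>",
           "<tr><th style='border: 1px solid #ddd; padding:4px;'>Name</th><th style='border: 1px solid #ddd; padding:4px;'>Store Link</th></tr>"]
        let parts := names.foldl
          (fun ps ext =>
            ps ++ ["<tr>" ++ td ++ ext ++ "</td>" ++ td ++ "<a href=\"https://marketplace.visualstudio.com/items?itemName=" ++ ext ++ "\" target=\"_blank\">" ++ ext ++ "</a></td></tr>"]) parts
        let parts := parts ++ ["</table>"]
        PySem.Str.join "" parts

-- ===== PRECONDITION & SPEC =====
def Spec_format_devcontainer_extensions (extensions_list : Option (List String)) (out : String) : Prop := out = format_devcontainer_extensions_alt extensions_list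
instance (extensions_list : Option (List String)) (out : String) : Decidable (Spec_format_devcontainer_extensions extensions_list out) := by unfold Spec_format_devcontainer_extensions; infer_instance

-- ===== CLAIM (what is proved, stated in full; the proofs are below) =====
def Claim_equal_format_devcontainer_extensions : Prop := ∀ (extensions_list : Option (List String)), Dom_format_devcontainer_extensions extensions_list → Spec_format_devcontainer_extensions extensions_list (format_devcontainer_extensions extensions_list)

-- ===== LEMMAS AND PROOFS =====

-- dropWhile is the identity on any prefix of a list it leaves unchanged
lemma pv_dw_prefix {p : Char → Bool} {t u : List Char} (h : t.dropWhile p = t)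
    (hu : u <+: t) : u.dropWhile p = u := by
  cases u with
  | nil => simp
  | cons c u' =>
    obtain ⟨w, hw⟩ := hu
    subst hw
    rw [List.cons_append] at h
    rw [List.dropWhile_cons] at h ⊢
    by_cases hc : p c = true
    · exfalso
      simp only [hc, if_true] at h
      have hle := List.length_dropWhile_le p (u' ++ w)
      rw [h] at hle
      simp at hle
    · simp [hc]

lemma pv_strip_idem_chars (s : List Char) :
    PySem.Chars.strip (PySem.Chars.strip s) = PySem.Chars.strip s := by
  unfold PySem.Chars.strip PySem.Chars.lstrip PySem.Chars.rstrip
  set p := PySem.Chars.isspace with hp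
  set t := s.dropWhile p with ht
  have h1 : t.dropWhile p = t := by rw [ht]; exact List.dropWhile_idempotent p s
  have hpre : (t.reverse.dropWhile p).reverse <+: t := by
    have hsfx : t.reverse.dropWhile p <:+ t.reverse := List.dropWhile_suffix p
    have := List.reverse_prefix.mpr hsfx
    simpa using this
  have h2 : ((t.reverse.dropWhile p).reverse).dropWhile p = (t.reverse.dropWhile p).reverse :=
    pv_dw_prefix h1 hpre
  rw [h2]
  simp [List.dropWhile_idempotent]

lemma pv_strip_idem (s : String) :
    PySem.Str.strip (PySem.Str.strip s) = PySem.Str.strip s := by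
  simp [PySem.Str.strip, pv_strip_idem_chars]

lemma pv_strip_cons_ne (c : Char) (cs : List Char) (h : PySem.Chars.isspace c = false) :
    PySem.Chars.strip (c :: cs) ≠ [] := by
  unfold PySem.Chars.strip PySem.Chars.lstrip PySem.Chars.rstrip
  rw [List.dropWhile_cons]
  simp only [h, Bool.false_eq_true, if_false]
  intro hnil
  rw [List.reverse_eq_nil_iff, List.dropWhile_eq_nil_iff] at hnil
  have := hnil c (by simp)
  rw [h] at this
  exact Bool.false_ne_true this

lemma pv_strip_ne (s : String) (c : Char) (cs : List Char) (hs : s.toList = c :: cs)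
    (hc : PySem.Chars.isspace c = false) : PySem.Str.strip s ≠ "" := by
  intro h
  have h2 := congrArg String.toList h
  simp only [PySem.Str.strip, String.toList_ofList] at h2
  rw [hs] at h2
  have : ("" : String).toList = [] := rfl
  rw [this] at h2
  exact pv_strip_cons_ne c cs hc h2

-- "".join over a cons / an append
lemma pv_intersperse_nil_flatten (ll : List (List Char)) :
    (List.intersperse ([] : List Char) ll).flatten = ll.flatten := by
  induction ll with
  | nil => simp
  | cons a l ih =>
    cases l with
    | nil => simp
    | cons b l' => simpa [List.intersperse] using ih

lemma pv_join_nil : PySem.Str.join "" [] = "" := by decide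

lemma pv_join_cons (s : String) (l : List String) :
    PySem.Str.join "" (s :: l) = s ++ PySem.Str.join "" l := by
  apply String.toList_inj.mp
  simp [PySem.Str.join, PySem.Chars.join, List.intercalate, pv_intersperse_nil_flatten]

-- literal strings as explicit character lists (for the final normalization)
set_option maxRecDepth 16384
lemma pv_lit_table : ("<table style='border-collapse: collapse;'>" : String).toList = ['<', 't', 'a', 'b', 'l', 'e', ' ', 's', 't', 'y', 'l', 'e', '=', '\'', 'b', 'o', 'r', 'd', 'e', 'r', '-', 'c', 'o', 'l', 'l', 'a', 'p', 's', 'e', ':', ' ', 'c', 'o', 'l', 'l', 'a', 'p', 's', 'e', ';', '\'', '>'] := by decide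

lemma pv_lit_tr : ("<tr>" : String).toList = ['<', 't', 'r', '>'] := by decide

lemma pv_lit_trc : ("</tr>" : String).toList = ['<', '/', 't', 'r', '>'] := by decide

lemma pv_lit_td : ("<td style='border: 1px solid #ddd; padding:4px;'>" : String).toList = ['<', 't', 'd', ' ', 's', 't', 'y', 'l', 'e', '=', '\'', 'b', 'o', 'r', 'd', 'e', 'r', ':', ' ', '1', 'p', 'x', ' ', 's', 'o', 'l', 'i', 'd', ' ', '#', 'd', 'd', 'd', ';', ' ', 'p', 'a', 'd', 'd', 'i', 'n', 'g', ':', '4', 'p', 'x', ';', '\'', '>'] := by decide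

lemma pv_lit_tdc : ("</td>" : String).toList = ['<', '/', 't', 'd', '>'] := by decide

lemma pv_lit_a : ("<a href=\"https://marketplace.visualstudio.com/items?itemName=" : String).toList = ['<', 'a', ' ', 'h', 'r', 'e', 'f', '=', '\"', 'h', 't', 't', 'p', 's', ':', '/', '/', 'm', 'a', 'r', 'k', 'e', 't', 'p', 'l', 'a', 'c', 'e', '.', 'v', 'i', 's', 'u', 'a', 'l', 's', 't', 'u', 'd', 'i', 'o', '.', 'c', 'o', 'm', '/', 'i', 't', 'e', 'm', 's', '?', 'i', 't', 'e', 'm', 'N', 'a', 'm', 'e', '='] := by decide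

lemma pv_lit_mid : ("\" target=\"_blank\">" : String).toList = ['\"', ' ', 't', 'a', 'r', 'g', 'e', 't', '=', '\"', '_', 'b', 'l', 'a', 'n', 'k', '\"', '>'] := by decide

lemma pv_lit_ac : ("</a>" : String).toList = ['<', '/', 'a', '>'] := by decide

lemma pv_lit_tablec : ("</table>" : String).toList = ['<', '/', 't', 'a', 'b', 'l', 'e', '>'] := by decide

lemma pv_lit_rowc : ("</a></td></tr>" : String).toList = ['<', '/', 'a', '>', '<', '/', 't', 'd', '>', '<', '/', 't', 'r', '>'] := by decide

lemma pv_lit_hdr : ("<tr><th style='border: 1px solid #ddd; padding:4px;'>Name</th><th style='border: 1px solid #ddd; padding:4px;'>Store Link</th></tr>" : String).toList = ['<', 't', 'r', '>', '<', 't', 'h', ' ', 's', 't', 'y', 'l', 'e', '=', '\'', 'b', 'o', 'r', 'd', 'e', 'r', ':', ' ', '1', 'p', 'x', ' ', 's', 'o', 'l', 'i', 'd', ' ', '#', 'd', 'd', 'd', ';', ' ', 'p', 'a', 'd', 'd', 'i', 'n', 'g', ':', '4', 'p', 'x', ';', '\'', '>', 'N', 'a', 'm', 'e', '<', '/', 't',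 'h', '>', '<', 't', 'h', ' ', 's', 't', 'y', 'l', 'e', '=', '\'', 'b', 'o', 'r', 'd', 'e', 'r', ':', ' ', '1', 'p', 'x', ' ', 's', 'o', 'l', 'i', 'd', ' ', '#', 'd', 'd', 'd', ';', ' ', 'p', 'a', 'd', 'd', 'i', 'n', 'g', ':', '4', 'p', 'x', ';', '\'', '>', 'S', 't', 'o', 'r', 'e', ' ', 'L', 'i', 'n', 'k', '<', '/', 't', 'h', '>', '<', '/', 't', 'r', '>'] := by decide

lemma pv_get0 (a b : String) : PySem.List.pyGetD [a, b] 0 "" = a := by simp [pysem]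

lemma pv_get1 (a b : String) : PySem.List.pyGetD [a, b] 1 "" = b := by simp [pysem]

-- a string-accumulating foldl is "".join of the mapped pieces
lemma pv_foldl_str {α : Type} (g : α → String) (l : List α) (init : String) :
    l.foldl (fun t x => t ++ g x) init = init ++ PySem.Str.join "" (l.map g) := by
  induction l generalizing init with
  | nil => simp [pv_join_nil]
  | cons a l ih => simp [List.foldl_cons, ih, pv_join_cons, String.append_assoc]

-- ===== VERDICT (by name: the statement is the Claim_ definition above) =====
set_option maxRecDepth 16384 in
set_option maxHeartbeats 3200000 in
theorem format_devcontainer_extensions_spec : Claim_equal_format_devcontainer_extensions := by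
  intro xl _
  unfold Spec_format_devcontainer_extensions
  cases xl with
  | none => rfl
  | some exts =>
    by_cases hne : exts = []
    · subst hne; rfl
    · simp only [format_devcontainer_extensions, format_devcontainer_extensions_alt,
        if_neg hne]
      set names : List String :=
        (exts.map (fun e => PySem.Str.strip e)).filter (fun e => e != "") with hnames
      have hrows :
          exts.foldl
            (fun rows ext =>
              let ext := PySem.Str.strip ext
              if ext != "" then
                rows ++ [[ext, "<a href=\"https://marketplace.visualstudio.com/items?itemName=" ++ ext ++ "\" target=\"_blank\">" ++ ext ++ "</a>"]]
              else rows) [] =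
          names.map (fun n => [n, "<a href=\"https://marketplace.visualstudio.com/items?itemName=" ++ n ++ "\" target=\"_blank\">" ++ n ++ "</a>"]) := by
        rw [hnames, List.filter_map, List.map_map]
        rw [PySem.List.foldl_append_if]
        simp [Function.comp_def]
      rw [hrows]
      by_cases hni : names = []
      · rw [hni]
        simp [generate_html_table]
      · obtain ⟨n₀, ns, hcons⟩ := List.exists_cons_of_ne_nil hni
        have hmem : ∀ n ∈ names, PySem.Str.strip n = n ∧ n ≠ "" := by
          intro n hn
          rw [hnames] at hn
          simp only [List.mem_filter, List.mem_map] at hn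
          obtain ⟨⟨e, _, he⟩, hne'⟩ := hn
          refine ⟨by rw [← he]; exact pv_strip_idem e, by simpa using hne'⟩
        have hn₀ : n₀ ∈ names := by rw [hcons]; exact List.mem_cons_self
        rw [if_neg hni]
        -- the A side: unfold the helper on the nonempty row list
        rw [generate_html_table]
        have hrne : names.map (fun n => ([n, "<a href=\"https://marketplace.visualstudio.com/items?itemName=" ++ n ++ "\" target=\"_blank\">" ++ n ++ "</a>"] : List String)) ≠ [] := by
          rw [hcons]; simp
        rw [if_neg hrne]
        have hrange : PySem.List.pyRange 0 ((["Name", "Store Link"] : List String).length : Int) 1 = [(0 : Int), 1] := by decide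
        have h0 : (names.map (fun n => ([n, "<a href=\"https://marketplace.visualstudio.com/items?itemName=" ++ n ++ "\" target=\"_blank\">" ++ n ++ "</a>"] : List String))).any
            (fun row => PySem.Str.strip (PySem.List.pyGetD row 0 "") != "") = true := by
          apply List.any_eq_true.mpr
          refine ⟨_, List.mem_map_of_mem hn₀, ?_⟩
          simp only [pv_get0, (hmem n₀ hn₀).1]
          exact bne_iff_ne.mpr (hmem n₀ hn₀).2
        have hlt : ("<a href=\"https://marketplace.visualstudio.com/items?itemName=" ++ n₀ ++ "\" target=\"_blank\">" ++ n₀ ++ "</a>").toList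
            = '<' :: (("a href=\"https://marketplace.visualstudio.com/items?itemName=" : String).toList ++ (n₀.toList ++ (("\" target=\"_blank\">" : String).toList ++ (n₀.toList ++ ("</a>" : String).toList)))) := by
          have hpre : ("<a href=\"https://marketplace.visualstudio.com/items?itemName=" : String).toList
              = '<' :: ("a href=\"https://marketplace.visualstudio.com/items?itemName=" : String).toList := by decide
          simp [hpre]
        have h1 : (names.map (fun n => ([n, "<a href=\"https://marketplace.visualstudio.com/items?itemName=" ++ n ++ "\" target=\"_blank\">" ++ n ++ "</a>"] : List String))).any
            (fun row => PySem.Str.strip (PySem.List.pyGetD row 1 "") != "") = true := by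
          apply List.any_eq_true.mpr
          refine ⟨_, List.mem_map_of_mem hn₀, ?_⟩
          have hsl := pv_strip_ne _ '<' _ hlt (by decide)
          simp only [pv_get1]
          exact bne_iff_ne.mpr hsl
        simp only [hrange, List.foldl_cons, List.foldl_nil, h0, h1, if_true, List.nil_append,
          List.singleton_append]
        -- now both sides are joins/folds of the same literal pieces
        rw [PySem.List.foldl_append_singleton_eq_map, pv_foldl_str]
        have hnh : List.map (fun i => PySem.List.pyGetD (["Name", "Store Link"] : List String) i "") ([0, 1] : List Int) = ["Name", "Store Link"] := by decide
        rw [hnh]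
        simp only [List.map_map, Function.comp_def, List.map_cons, List.map_nil, pv_get0, pv_get1]
        apply String.toList_inj.mp
        simp [PySem.Chars.join, List.intercalate, pv_intersperse_nil_flatten,
          List.map_map, Function.comp_def, pv_lit_table, pv_lit_tr,
          pv_lit_trc, pv_lit_td, pv_lit_tdc, pv_lit_a, pv_lit_mid,
          pv_lit_ac, pv_lit_tablec, pv_lit_rowc, pv_lit_hdr]
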